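-- pv_equiv track=rewrite | github.com/andrewgryan/bokeh-playground | chronometer/chronometer.py | ticks
-- ===== SOURCE A (Python) =====
-- def ticks(max_hour):
--     """Choose appropriate tick locations for forecasts"""
--     step_size = 3
--     while max_hour >= (4 * step_size):
--         step_size *= 2
--     hour = 0
--     ticks = []
--     while (hour <= max_hour):
--         ticks.append(hour)
--         hour += step_size
--     return ticks
-- ===== SOURCE B (Python) =====
-- def ticks(max_hour):
--     """Choose appropriate tick locations for forecasts"""
--     n = max(max_hour, 0) // 12
--     step_size = 3 * (1 << n.bit_length())
--     return list(range(0, max_hour + 1, step_size))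
-- ===== Notes on version B (the rewrite author's own statement) =====
-- stated objective: simpler
-- what changed: The doubling while-loop that searches for the step size is replaced by a closed-form computation (step = 3 * 2^bit_length(max(max_hour,0)//12)) and the hand-rolled append loop by list(range(0, max_hour+1, step)).
import Mathlib
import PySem

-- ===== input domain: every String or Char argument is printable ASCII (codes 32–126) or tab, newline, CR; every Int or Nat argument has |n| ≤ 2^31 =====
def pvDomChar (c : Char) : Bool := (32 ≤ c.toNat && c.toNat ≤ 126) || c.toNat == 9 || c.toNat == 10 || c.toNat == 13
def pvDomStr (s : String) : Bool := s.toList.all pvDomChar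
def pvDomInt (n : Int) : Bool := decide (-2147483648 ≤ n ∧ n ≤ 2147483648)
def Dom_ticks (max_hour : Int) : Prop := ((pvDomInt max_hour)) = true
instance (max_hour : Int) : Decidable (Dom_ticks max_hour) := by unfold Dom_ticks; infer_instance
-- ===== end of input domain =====

-- B replaces A's step-size doubling loop by a closed form and the append loop by range(); objective: simpler.

-- ===== PORT A =====
-- while max_hour >= 4 * step_size: step_size *= 2
-- (fuel only makes the loop total; it is provably sufficient, see ticksStepLoop_eq below)
def ticksStepLoop (fuel : Nat) (max_hour s : Int) : Int :=
  match fuel with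
  | 0 => s
  | f + 1 => if max_hour ≥ 4 * s then ticksStepLoop f max_hour (s * 2) else s

-- while hour <= max_hour: ticks.append(hour); hour += step_size
-- (fuel only makes the loop total; it is provably sufficient, see ticksHourLoop_eq below)
def ticksHourLoop (fuel : Nat) (max_hour step hour : Int) (acc : List Int) : List Int :=
  match fuel with
  | 0 => acc
  | f + 1 => if hour ≤ max_hour then ticksHourLoop f max_hour step (hour + step) (acc ++ [hour]) else acc

def ticks (max_hour : Int) : List Int :=
  ticksHourLoop (max_hour.toNat + 1) max_hour (ticksStepLoop (max_hour.toNat + 1) max_hour 3) 0 []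

-- ===== PORT B =====
-- n = max(max_hour, 0) // 12; step_size = 3 * (1 << n.bit_length()); list(range(0, max_hour+1, step_size))
def ticks_alt (max_hour : Int) : List Int :=
  let n : Int := PySem.Int.floordiv (max max_hour 0) 12
  let step_size : Int := 3 * 2 ^ PySem.Int.bitLength n
  PySem.List.pyRange 0 (max_hour + 1) step_size

-- ===== PRECONDITION & SPEC =====
def Spec_ticks (max_hour : Int) (out : List Int) : Prop := out = ticks_alt max_hour
instance (max_hour : Int) (out : List Int) : Decidable (Spec_ticks max_hour out) := by unfold Spec_ticks; infer_instance

-- ===== CLAIM (what is proved, stated in full; the proofs are below) =====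
def Claim_equal_ticks : Prop := ∀ (max_hour : Int), Dom_ticks max_hour → Spec_ticks max_hour (ticks max_hour)

-- ===== LEMMAS AND PROOFS =====

theorem bitLength_pos_nat (m : Nat) (hm : 0 < m) : 0 < PySem.Int.bitLength (m : Int) := by
  rw [PySem.Int.bitLength_natCast hm]; omega

theorem bitLength_le_nat (m : Nat) : PySem.Int.bitLength (m : Int) ≤ m := by
  induction m using Nat.strong_induction_on with
  | _ m ih =>
    match m with
    | 0 => simp [PySem.Int.bitLength_zero]
    | 1 =>
        rw [PySem.Int.bitLength_natCast (by omega)]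
        norm_num [PySem.Int.bitLength_zero]
    | (k + 2) =>
        rw [PySem.Int.bitLength_natCast (by omega)]
        have := ih ((k + 2) / 2) (by omega)
        omega

-- with enough fuel, A's step loop computes s * 2^bit_length(⌊max_hour⌋₊ / (4s))
theorem ticksStepLoop_eq (fuel : Nat) (max_hour s : Int) (hs : 0 < s)
    (hf : PySem.Int.bitLength ((max_hour.toNat / (4 * s.toNat) : Nat) : Int) ≤ fuel) :
    ticksStepLoop fuel max_hour s
      = s * 2 ^ PySem.Int.bitLength ((max_hour.toNat / (4 * s.toNat) : Nat) : Int) := by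
  induction fuel generalizing s with
  | zero =>
      rcases Nat.eq_zero_or_pos (max_hour.toNat / (4 * s.toNat)) with h0 | h0
      · rw [h0]
        simp [ticksStepLoop, PySem.Int.bitLength_zero]
      · have := bitLength_pos_nat _ h0
        omega
  | succ f ih =>
      rw [ticksStepLoop]
      by_cases h : max_hour ≥ 4 * s
      · rw [if_pos h]
        have hpos : 0 < max_hour.toNat / (4 * s.toNat) := by
          apply Nat.div_pos <;> omega
        have hbl : PySem.Int.bitLength ((max_hour.toNat / (4 * s.toNat) : Nat) : Int)
            = PySem.Int.bitLength ((max_hour.toNat / (4 * (s * 2).toNat) : Nat) : Int) + 1 := by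
          have hdd : 4 * s.toNat * 2 = 4 * (s * 2).toNat := by omega
          rw [PySem.Int.bitLength_natCast hpos, Nat.div_div_eq_div_mul, hdd]
        have hf2 : PySem.Int.bitLength ((max_hour.toNat / (4 * (s * 2).toNat) : Nat) : Int) ≤ f := by
          rw [hbl] at hf
          exact Nat.succ_le_succ_iff.mp hf
        rw [ih (s * 2) (by omega) hf2, hbl, pow_succ]
        ring
      · rw [if_neg h]
        have h0 : max_hour.toNat / (4 * s.toNat) = 0 := Nat.div_eq_of_lt (by omega)
        rw [h0]
        simp [PySem.Int.bitLength_zero]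

-- cons unfolding for a positive-step range
theorem pyRange_pos_cons (a b s : Int) (hs : 0 < s) (h : a < b) :
    PySem.List.pyRange a b s = a :: PySem.List.pyRange (a + s) b s := by
  rw [PySem.List.pyRange_of_pos _ _ hs, PySem.List.pyRange_of_pos _ _ hs, if_pos h]
  have hq0 : 0 ≤ (b - a - 1) / s := Int.ediv_nonneg (by omega) (by omega)
  have hc1 : b - a + s - 1 = (b - a - 1) + 1 * s := by ring
  have hc : (b - a + s - 1) / s = (b - a - 1) / s + 1 := by
    rw [hc1, Int.add_mul_ediv_right _ _ (by omega : s ≠ 0)]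
  by_cases hlt : a + s < b
  · rw [if_pos hlt]
    have harg : b - (a + s) + s - 1 = b - a - 1 := by ring
    rw [harg, hc]
    have hn : ((b - a - 1) / s + 1).toNat = ((b - a - 1) / s).toNat + 1 := by omega
    rw [hn, List.range_succ_eq_map, List.map_cons, List.map_map]
    refine List.cons_eq_cons.mpr ⟨by push_cast; ring, ?_⟩
    apply List.map_congr_left
    intro k _
    simp only [Function.comp_apply]
    push_cast
    ring
  · rw [if_neg hlt]
    have hz : (b - a - 1) / s = 0 := Int.ediv_eq_zero_of_lt (by omega) (by omega)
    rw [hc, hz]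
    simp

theorem pyRange_pos_nil (a b s : Int) (hs : 0 < s) (h : b ≤ a) :
    PySem.List.pyRange a b s = [] := by
  rw [PySem.List.pyRange_of_pos _ _ hs, if_neg (by omega)]
  simp

-- with enough fuel, A's append loop produces acc ++ range(hour, max_hour+1, step)
theorem ticksHourLoop_eq (fuel : Nat) (max_hour step hour : Int) (acc : List Int)
    (hs : 0 < step) (hf : max_hour + 1 - hour ≤ (fuel : Int)) :
    ticksHourLoop fuel max_hour step hour acc
      = acc ++ PySem.List.pyRange hour (max_hour + 1) step := by
  induction fuel generalizing hour acc with
  | zero =>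
      rw [ticksHourLoop, pyRange_pos_nil _ _ _ hs (by omega)]
      simp
  | succ f ih =>
      rw [ticksHourLoop]
      by_cases h : hour ≤ max_hour
      · rw [if_pos h, ih (hour + step) (acc ++ [hour]) (by omega),
            pyRange_pos_cons hour (max_hour + 1) step hs (by omega)]
        simp
      · rw [if_neg h, pyRange_pos_nil _ _ _ hs (by omega)]
        simp

-- the two step sizes agree
theorem step_eq (max_hour : Int) :
    ticksStepLoop (max_hour.toNat + 1) max_hour 3
      = 3 * 2 ^ PySem.Int.bitLength (PySem.Int.floordiv (max max_hour 0) 12) := by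
  have h12 : 4 * Int.toNat 3 = 12 := rfl
  have hfuel : PySem.Int.bitLength ((max_hour.toNat / (4 * Int.toNat 3) : Nat) : Int)
      ≤ max_hour.toNat + 1 := by
    rw [h12]
    have h1 := bitLength_le_nat (max_hour.toNat / 12)
    have h2 : max_hour.toNat / 12 ≤ max_hour.toNat := Nat.div_le_self _ _
    omega
  rw [ticksStepLoop_eq _ _ _ (by omega) hfuel, PySem.Int.floordiv_eq_ediv_of_pos (by omega)]
  rw [h12]
  congr 2
  congr 1
  omega

-- the step size is positive
theorem step_pos (max_hour : Int) : 0 < ticksStepLoop (max_hour.toNat + 1) max_hour 3 := by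
  rw [step_eq]
  positivity

-- ===== VERDICT (by name: the statement is the Claim_ definition above) =====
theorem ticks_spec : Claim_equal_ticks := by
  intro max_hour _
  unfold Spec_ticks ticks ticks_alt
  rw [ticksHourLoop_eq _ _ _ _ _ (step_pos max_hour) (by omega), step_eq]
  simp
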